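-- pv_equiv track=rewrite | github.com/HallAlexander/Python | VS Code/Python/Kattis/musical_question.py | optim
-- ===== SOURCE A (Python) =====
-- def optim(lst, c):
--     dp = [[False] * (c + 1) for _ in range(c + 1)]
--     dp[0][0] = True
--     for v in lst:
--         for s1 in range(c, -1, -1):
--             for s2 in range(c, -1, -1):
--                 if not dp[s1][s2]:
--                     continue
--                 if s1 + v <= c:
--                     dp[s1 + v][s2] = True
--                 if s2 + v <= c:
--                     dp[s1][s2 + v] = True
--     best_total = 0
--     best_pair = (0, 0)
--     for s1 in range(c + 1):
--         for s2 in range(c + 1):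
--             if not dp[s1][s2]:
--                 continue
--             total = s1 + s2
--             if total > best_total or (
--                 total == best_total and abs(s1 - s2) < abs(best_pair[0] - best_pair[1])
--             ):
--                 best_total = total
--                 best_pair = (s1, s2)
--     return best_pair
-- ===== SOURCE B (Python) =====
-- def optim(lst, c):
--     # Divide and conquer: reachable (s1, s2) pairs of a list are the capped
--     # Minkowski sums of the reachable pairs of its two halves.
--     def reach(items):
--         if not items:
--             return {(0, 0)}
--         if len(items) == 1:
--             v = items[0]
--             out = {(0, 0)}
--             if v <= c:
--                 out.add((v, 0))
--                 out.add((0, v))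
--             return out
--         mid = len(items) // 2
--         left = reach(items[:mid])
--         right = reach(items[mid:])
--         combined = set()
--         for a1, a2 in left:
--             for b1, b2 in right:
--                 if a1 + b1 <= c and a2 + b2 <= c:
--                     combined.add((a1 + b1, a2 + b2))
--         return combined
--     best_total = 0
--     best_pair = (0, 0)
--     for s1, s2 in sorted(reach(lst)):
--         total = s1 + s2
--         if total > best_total or (
--             total == best_total and abs(s1 - s2) < abs(best_pair[0] - best_pair[1])
--         ):
--             best_total = total
--             best_pair = (s1, s2)
--     return best_pair
-- ===== Notes on version B (the rewrite author's own statement) =====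
-- stated objective: alternative
-- what changed: B replaces A's sequential in-place (c+1)x(c+1) boolean-grid knapsack (descending index sweeps per item) by a divide-and-conquer: it recursively computes the reachable (s1,s2) pair sets of the two halves of the list and combines them as a capped Minkowski sum, then scans the sorted result once.
-- outside the precondition, e.g. on optim([-1], 2): A returns (0, 2), B returns (0, 0); on optim([], -1): A raises IndexError, B returns (0, 0)
import Mathlib
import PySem

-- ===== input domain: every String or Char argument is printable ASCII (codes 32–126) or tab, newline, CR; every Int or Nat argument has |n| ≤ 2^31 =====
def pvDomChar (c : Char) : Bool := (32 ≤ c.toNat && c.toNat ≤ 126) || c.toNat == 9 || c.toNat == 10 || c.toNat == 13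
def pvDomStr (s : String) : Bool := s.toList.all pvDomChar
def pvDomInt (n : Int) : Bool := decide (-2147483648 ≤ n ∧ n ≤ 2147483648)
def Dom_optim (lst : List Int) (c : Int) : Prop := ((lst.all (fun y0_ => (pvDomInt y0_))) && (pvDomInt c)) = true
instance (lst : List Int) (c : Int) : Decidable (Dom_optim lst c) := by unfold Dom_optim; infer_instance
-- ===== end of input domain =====

-- B replaces A's sequential in-place (c+1)x(c+1) boolean-grid knapsack (descending index
-- sweeps per item) by divide and conquer: the reachable (s1,s2) pair sets of the two halves
-- of the list are computed recursively and combined as a capped Minkowski sum, then the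
-- sorted result is scanned once; equal return value on the natural domain (c ≥ 0, values ≥ 0).

-- ===== PORT A =====
-- dp[s1][s2] read; pyGetD is exact here: under Pre_optim every index A reads is nonnegative (in range or past the end)
def cellA (dp : List (List Bool)) (i j : Int) : Bool :=
  PySem.List.pyGetD (PySem.List.pyGetD dp i []) j false

-- dp = [[False]*(c+1) for _ in range(c+1)]; dp[0][0] = True (in range under Pre_optim: c ≥ 0)
def dpInitA (c : Int) : List (List Bool) :=
  let dp := (PySem.List.pyRange 0 (c + 1) 1).map (fun _ => PySem.List.pyRepeat [false] (c + 1))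
  PySem.List.pySetD dp 0 (PySem.List.pySetD (PySem.List.pyGetD dp 0 []) 0 true)

-- the body of A's innermost loop (one (s1,s2) step; writes exact under Pre_optim: indices are then nonnegative and in range)
def bodyA (c v : Int) (dp : List (List Bool)) (s1 s2 : Int) : List (List Bool) :=
  if !(cellA dp s1 s2) then dp
  else
    let dp := if s1 + v ≤ c then
        PySem.List.pySetD dp (s1 + v) (PySem.List.pySetD (PySem.List.pyGetD dp (s1 + v) []) s2 true)
      else dp
    if s2 + v ≤ c then
        PySem.List.pySetD dp s1 (PySem.List.pySetD (PySem.List.pyGetD dp s1 []) (s2 + v) true)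
      else dp

-- for s2 in range(c, -1, -1): …
def innerA (c v s1 : Int) (dp : List (List Bool)) : List (List Bool) :=
  (PySem.List.pyRange c (-1) (-1)).foldl (fun dp s2 => bodyA c v dp s1 s2) dp

-- for s1 in range(c, -1, -1): …  (one item v)
def itemA (c : Int) (dp : List (List Bool)) (v : Int) : List (List Bool) :=
  (PySem.List.pyRange c (-1) (-1)).foldl (fun dp s1 => innerA c v s1 dp) dp

-- the final double scan collecting (best_total, best_pair)
def scanA (c : Int) (dp : List (List Bool)) : Int × (Int × Int) :=
  (PySem.List.pyRange 0 (c + 1) 1).foldl (fun acc s1 =>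
    (PySem.List.pyRange 0 (c + 1) 1).foldl (fun (acc : Int × (Int × Int)) s2 =>
      if !(cellA dp s1 s2) then acc
      else
        if s1 + s2 > acc.1 ∨ (s1 + s2 = acc.1 ∧ |s1 - s2| < |acc.2.1 - acc.2.2|) then
          (s1 + s2, (s1, s2))
        else acc) acc) ((0 : Int), ((0 : Int), (0 : Int)))

def optim (lst : List Int) (c : Int) : Int × Int :=
  (scanA c (lst.foldl (itemA c) (dpInitA c))).2

-- ===== PORT B =====
-- the nested 'for a in left: for b in right:' loops building the combined set
def combineB (c : Int) (L R : PySem.Set (Int × Int)) : PySem.Set (Int × Int) :=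
  L.foldl (fun acc a =>
    R.foldl (fun (acc : PySem.Set (Int × Int)) b =>
      if a.1 + b.1 ≤ c ∧ a.2 + b.2 ≤ c then PySem.Set.add acc (a.1 + b.1, a.2 + b.2) else acc)
      acc) PySem.Set.empty

-- reach(items): divide and conquer on the item list (items[:mid] / items[mid:] are slices);
-- fuel = items.length only makes the recursion structural (it never changes the value)
def reachBF (c : Int) : Nat → List Int → PySem.Set (Int × Int)
  | 0, _ => PySem.Set.ofList [((0 : Int), (0 : Int))]
  | fuel + 1, items =>
    if items.length = 0 then PySem.Set.ofList [((0 : Int), (0 : Int))]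
    else if items.length = 1 then
      -- v = items[0]; out = {(0,0)}; conditional adds (v inlined; same value)
      if PySem.List.pyGetD items 0 0 ≤ c then
        PySem.Set.add (PySem.Set.add (PySem.Set.ofList [((0 : Int), (0 : Int))])
          (PySem.List.pyGetD items 0 0, 0)) (0, PySem.List.pyGetD items 0 0)
      else PySem.Set.ofList [((0 : Int), (0 : Int))]
    else
      combineB c
        (reachBF c fuel (PySem.List.slice items none (some (PySem.Int.floordiv (items.length : Int) 2))))
        (reachBF c fuel (PySem.List.slice items (some (PySem.Int.floordiv (items.length : Int) 2)) none))

def reachB (c : Int) (items : List Int) : PySem.Set (Int × Int) :=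
  reachBF c items.length items

-- for (s1, s2) in sorted(reach(lst)): …  (Python tuple order = lexicographic, so sorted2 on (fst, snd))
def scanB (states : PySem.Set (Int × Int)) : Int × (Int × Int) :=
  (PySem.List.sorted2 states (fun p => p.1) (fun p => p.2)).foldl
    (fun (acc : Int × (Int × Int)) p =>
      if p.1 + p.2 > acc.1 ∨ (p.1 + p.2 = acc.1 ∧ |p.1 - p.2| < |acc.2.1 - acc.2.2|) then
        (p.1 + p.2, p)
      else acc) ((0 : Int), ((0 : Int), (0 : Int)))

def optim_alt (lst : List Int) (c : Int) : Int × Int :=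
  (scanB (reachB c lst)).2

-- ===== PRECONDITION & SPEC =====
-- Pre_ restricts to the task's natural domain (capacity and item values nonnegative): A raises
-- IndexError when c < 0 or when some v < -(c+1), and for -(c+1) ≤ v < 0 the values A returns come
-- from Python negative-index wraparound into the dp grid, an accident of the dense-grid layout.
def Pre_optim (lst : List Int) (c : Int) : Prop := 0 ≤ c ∧ ∀ v ∈ lst, 0 ≤ v
instance (lst : List Int) (c : Int) : Decidable (Pre_optim lst c) := by unfold Pre_optim; infer_instance
def pvWitness_optim : List Int × Int := ([2, 3, 4], 5)

def Spec_optim (lst : List Int) (c : Int) (out : Int × Int) : Prop := out = optim_alt lst c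
instance (lst : List Int) (c : Int) (out : Int × Int) : Decidable (Spec_optim lst c out) := by unfold Spec_optim; infer_instance

-- ===== CLAIM (what is proved, stated in full; the proofs are below) =====
def Claim_equal_optim : Prop := ∀ (lst : List Int) (c : Int), Dom_optim lst c → Pre_optim lst c → Spec_optim lst c (optim lst c)

-- ===== LEMMAS AND PROOFS =====
def Grid (c : Int) (dp : List (List Bool)) : Prop :=
  dp.length = (c + 1).toNat ∧ ∀ row ∈ dp, row.length = (c + 1).toNat

def wrA (dp : List (List Bool)) (r s : Int) : List (List Bool) :=
  PySem.List.pySetD dp r (PySem.List.pySetD (PySem.List.pyGetD dp r []) s true)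

lemma cellA_nonneg (dp : List (List Bool)) (i j : Int) (hi : 0 ≤ i) (hj : 0 ≤ j) :
    cellA dp i j = (dp.getD i.toNat []).getD j.toNat false := by
  have h1 := PySem.List.pyGetD_natCast dp i.toNat ([] : List Bool)
  have h2 := PySem.List.pyGetD_natCast (dp.getD i.toNat []) j.toNat false
  rw [Int.toNat_of_nonneg hi] at h1
  rw [Int.toNat_of_nonneg hj] at h2
  rw [cellA, h1, h2]

lemma grid_wrA (c : Int) (dp : List (List Bool)) (hG : Grid c dp) (r s : Int)
    (hr : 0 ≤ r) (hrc : r ≤ c) (hs : 0 ≤ s) (hsc : s ≤ c) : Grid c (wrA dp r s) := by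
  rcases hG with ⟨hlen, hrow⟩
  have hrlt : r.toNat < dp.length := by omega
  have h1 := PySem.List.pyGetD_natCast dp r.toNat ([] : List Bool)
  rw [Int.toNat_of_nonneg hr] at h1
  constructor
  · rw [wrA, PySem.List.pySetD_of_nonneg _ _ hr, List.length_set]; exact hlen
  · intro row hmem
    rw [wrA, PySem.List.pySetD_of_nonneg _ _ hr] at hmem
    rcases List.mem_or_eq_of_mem_set hmem with hmem' | heq
    · exact hrow _ hmem'
    · rw [heq, PySem.List.pySetD_of_nonneg _ _ hs, h1, List.length_set]
      have hm : dp.getD r.toNat [] ∈ dp := by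
        rw [List.getD_eq_getElem?_getD, List.getElem?_eq_getElem hrlt]; exact List.getElem_mem _
      exact hrow _ hm

lemma cellA_wrA (c : Int) (dp : List (List Bool)) (hG : Grid c dp) (r s : Int)
    (hr : 0 ≤ r) (hrc : r ≤ c) (hs : 0 ≤ s) (hsc : s ≤ c) (i j : Int) (hi : 0 ≤ i) (hj : 0 ≤ j) :
    cellA (wrA dp r s) i j = if i = r ∧ j = s then true else cellA dp i j := by
  have hG' := hG
  rcases hG' with ⟨hlen, hrow⟩
  have hrlt : r.toNat < dp.length := by omega
  have hslt : s.toNat < (dp.getD r.toNat []).length := by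
    have hm : dp.getD r.toNat [] ∈ dp := by
      rw [List.getD_eq_getElem?_getD, List.getElem?_eq_getElem hrlt]; exact List.getElem_mem _
    have := hrow _ hm; omega
  have h1 := PySem.List.pyGetD_natCast dp r.toNat ([] : List Bool)
  rw [Int.toNat_of_nonneg hr] at h1
  rw [cellA_nonneg _ _ _ hi hj, cellA_nonneg _ _ _ hi hj, wrA,
      PySem.List.pySetD_of_nonneg _ _ hr, PySem.List.pySetD_of_nonneg _ _ hs, h1]
  rw [List.getD_eq_getElem?_getD (l := dp.set r.toNat _), List.getElem?_set]
  by_cases hir : r.toNat = i.toNat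
  · have hie : i = r := by omega
    simp only [if_pos hir, if_pos hrlt, Option.getD_some]
    rw [List.getD_eq_getElem?_getD (l := (dp.getD r.toNat []).set s.toNat true), List.getElem?_set]
    by_cases hjs : s.toNat = j.toNat
    · have hje : j = s := by omega
      have hslt' : s.toNat < (dp[r.toNat]?.getD []).length := by
        rwa [← List.getD_eq_getElem?_getD]
      simp [hie, hje, hslt']
    · have hje : ¬ (j = s) := by omega
      have hns : ¬ (i = r ∧ j = s) := fun hh => hje hh.2
      rw [if_neg hns, if_neg hjs, ← List.getD_eq_getElem?_getD, hir]
  · have hie : ¬ (i = r) := by omega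
    have : ¬ (i = r ∧ j = s) := fun hh => hie hh.1
    rw [if_neg this, if_neg hir, ← List.getD_eq_getElem?_getD]

def w1 (c v : Int) (f : Int → Int → Bool) (i j : Int) : Bool := decide (v ≤ i ∧ i ≤ c) && f (i - v) j

def w2 (c v : Int) (f : Int → Int → Bool) (i j : Int) : Bool := decide (v ≤ j ∧ j ≤ c) && f i (j - v)

def stepR (c v : Int) (f : Int → Int → Bool) (i j : Int) : Bool := f i j || w1 c v f i j || w2 c v f i j

def Supp (c : Int) (f : Int → Int → Bool) : Prop := ∀ i j, f i j = true → 0 ≤ i ∧ i ≤ c ∧ 0 ≤ j ∧ j ≤ c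

def innerInv (c v a : Int) (f : Int → Int → Bool) (m i j : Int) : Bool :=
  f i j || (decide (a < i - v) && w1 c v f i j) || (decide (a < i) && w2 c v f i j)
    || (decide (i - v = a ∧ m ≤ j) && w1 c v f i j) || (decide (i = a ∧ m ≤ j - v) && w2 c v f i j)

lemma bodyA_eq_wr (c v : Int) (dp : List (List Bool)) (s1 s2 : Int) (h : cellA dp s1 s2 = true) :
    bodyA c v dp s1 s2 =
      (if s2 + v ≤ c then wrA (if s1 + v ≤ c then wrA dp (s1 + v) s2 else dp) s1 (s2 + v)
       else (if s1 + v ≤ c then wrA dp (s1 + v) s2 else dp)) := by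
  rw [bodyA, h]
  by_cases h1 : s1 + v ≤ c <;> by_cases h2 : s2 + v ≤ c <;>
    simp [h1, h2, wrA]

lemma innerInv_read (c v a : Int) (f : Int → Int → Bool) (hv : 0 ≤ v) (m : Int) :
    innerInv c v a f (m + 1) a m = f a m := by
  rw [innerInv]
  rw [decide_eq_false (by omega : ¬ (a < a - v)), decide_eq_false (by omega : ¬ (a < a)),
      decide_eq_false (by omega : ¬ (a - v = a ∧ m + 1 ≤ m)),
      decide_eq_false (by omega : ¬ (a = a ∧ m + 1 ≤ m - v))]
  simp

lemma innerInv_step_false (c v a : Int) (f : Int → Int → Bool) (m : Int)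
    (hf : f a m = false) (i j : Int) :
    innerInv c v a f m i j = innerInv c v a f (m + 1) i j := by
  rw [innerInv, innerInv]
  have h4 : (decide (i - v = a ∧ m ≤ j) && w1 c v f i j)
      = (decide (i - v = a ∧ m + 1 ≤ j) && w1 c v f i j) := by
    by_cases hc2 : i - v = a ∧ j = m
    · rw [w1, hc2.1, hc2.2, hf]
      simp
    · rw [decide_eq_decide.mpr (show (i - v = a ∧ m ≤ j) ↔ (i - v = a ∧ m + 1 ≤ j) by omega)]
  have h5 : (decide (i = a ∧ m ≤ j - v) && w2 c v f i j)
      = (decide (i = a ∧ m + 1 ≤ j - v) && w2 c v f i j) := by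
    by_cases hc2 : i = a ∧ j - v = m
    · rw [w2, hc2.1, hc2.2, hf]
      simp
    · rw [decide_eq_decide.mpr (show (i = a ∧ m ≤ j - v) ↔ (i = a ∧ m + 1 ≤ j - v) by omega)]
  rw [h4, h5]

lemma innerInv_step_true (c v a : Int) (f : Int → Int → Bool) (hv : 0 ≤ v) (ha0 : 0 ≤ a)
    (m : Int) (hm0 : 0 ≤ m) (hf : f a m = true) (i j : Int) :
    innerInv c v a f m i j =
      (if i = a ∧ j = m + v ∧ m + v ≤ c then true
       else if i = a + v ∧ j = m ∧ a + v ≤ c then true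
       else innerInv c v a f (m + 1) i j) := by
  by_cases c1 : i = a ∧ j = m + v ∧ m + v ≤ c
  · rw [if_pos c1]
    obtain ⟨e1, e2, e3⟩ := c1
    have h5 : (decide (i = a ∧ m ≤ j - v) && w2 c v f i j) = true := by
      rw [w2, e1, e2, decide_eq_true (show a = a ∧ m ≤ m + v - v by omega),
          decide_eq_true (show v ≤ m + v ∧ m + v ≤ c by omega),
          show m + v - v = m by omega, hf]
      rfl
    rw [innerInv, h5, Bool.or_true]
  · rw [if_neg c1]
    by_cases c2 : i = a + v ∧ j = m ∧ a + v ≤ c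
    · rw [if_pos c2]
      obtain ⟨e1, e2, e3⟩ := c2
      have h4 : (decide (i - v = a ∧ m ≤ j) && w1 c v f i j) = true := by
        rw [w1, e1, e2, decide_eq_true (show a + v - v = a ∧ m ≤ m by omega),
            decide_eq_true (show v ≤ a + v ∧ a + v ≤ c by omega),
            show a + v - v = a by omega, hf]
        rfl
      rw [innerInv, h4]
      simp
    · rw [if_neg c2, innerInv, innerInv]
      have h4 : (decide (i - v = a ∧ m ≤ j) && w1 c v f i j)
          = (decide (i - v = a ∧ m + 1 ≤ j) && w1 c v f i j) := by
        by_cases hx : i = a + v ∧ j = m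
        · have hg : ¬ (a + v ≤ c) := fun hh => c2 ⟨hx.1, hx.2, hh⟩
          rw [w1, decide_eq_false (show ¬ (v ≤ i ∧ i ≤ c) by omega)]
          simp
        · rw [decide_eq_decide.mpr (show (i - v = a ∧ m ≤ j) ↔ (i - v = a ∧ m + 1 ≤ j) by omega)]
      have h5 : (decide (i = a ∧ m ≤ j - v) && w2 c v f i j)
          = (decide (i = a ∧ m + 1 ≤ j - v) && w2 c v f i j) := by
        by_cases hx : i = a ∧ j = m + v
        · have hg : ¬ (m + v ≤ c) := fun hh => c1 ⟨hx.1, hx.2, hh⟩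
          rw [w2, decide_eq_false (show ¬ (v ≤ j ∧ j ≤ c) by omega)]
          simp
        · rw [decide_eq_decide.mpr (show (i = a ∧ m ≤ j - v) ↔ (i = a ∧ m + 1 ≤ j - v) by omega)]
      rw [h4, h5]

lemma bodyA_step (c v a : Int) (f : Int → Int → Bool) (hv : 0 ≤ v) (ha0 : 0 ≤ a) (hac : a ≤ c)
    (m : Int) (hm0 : 0 ≤ m) (hm : m ≤ c) (dp : List (List Bool)) (hG : Grid c dp)
    (hInv : ∀ i j, 0 ≤ i → 0 ≤ j → cellA dp i j = innerInv c v a f (m + 1) i j) :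
    Grid c (bodyA c v dp a m) ∧
    ∀ i j, 0 ≤ i → 0 ≤ j → cellA (bodyA c v dp a m) i j = innerInv c v a f m i j := by
  have hread : cellA dp a m = f a m := by
    rw [hInv a m ha0 hm0, innerInv_read c v a f hv m]
  cases hf : f a m with
  | false =>
    have hbody : bodyA c v dp a m = dp := by
      rw [bodyA, hread, hf]
      rfl
    rw [hbody]
    refine ⟨hG, fun i j hi hj => ?_⟩
    rw [hInv i j hi hj, innerInv_step_false c v a f m hf i j]
  | true =>
    have hbody := bodyA_eq_wr c v dp a m (by rw [hread, hf])
    rw [hbody]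
    have hG1 : Grid c (if a + v ≤ c then wrA dp (a + v) m else dp) := by
      by_cases hg1 : a + v ≤ c
      · rw [if_pos hg1]
        exact grid_wrA c dp hG (a + v) m (by omega) (by omega) hm0 hm
      · rw [if_neg hg1]
        exact hG
    have hc1 : ∀ i j, 0 ≤ i → 0 ≤ j →
        cellA (if a + v ≤ c then wrA dp (a + v) m else dp) i j =
          (if i = a + v ∧ j = m ∧ a + v ≤ c then true else innerInv c v a f (m + 1) i j) := by
      intro i j hi hj
      by_cases hg1 : a + v ≤ c
      · rw [if_pos hg1, cellA_wrA c dp hG (a + v) m (by omega) (by omega) hm0 hm i j hi hj]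
        by_cases hx : i = a + v ∧ j = m
        · rw [if_pos hx, if_pos ⟨hx.1, hx.2, hg1⟩]
        · rw [if_neg hx, if_neg (fun hh => hx ⟨hh.1, hh.2.1⟩), hInv i j hi hj]
      · rw [if_neg hg1, if_neg (fun hh => hg1 hh.2.2), hInv i j hi hj]
    constructor
    · by_cases hg2 : m + v ≤ c
      · rw [if_pos hg2]
        exact grid_wrA c _ hG1 a (m + v) ha0 hac (by omega) hg2
      · rw [if_neg hg2]
        exact hG1
    · intro i j hi hj
      rw [innerInv_step_true c v a f hv ha0 m hm0 hf i j]
      by_cases hg2 : m + v ≤ c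
      · rw [if_pos hg2, cellA_wrA c _ hG1 a (m + v) ha0 hac (by omega) hg2 i j hi hj]
        by_cases hx : i = a ∧ j = m + v
        · rw [if_pos hx, if_pos ⟨hx.1, hx.2, hg2⟩]
        · rw [if_neg hx,
              if_neg (show ¬ (i = a ∧ j = m + v ∧ m + v ≤ c) from fun hh => hx ⟨hh.1, hh.2.1⟩),
              hc1 i j hi hj]
      · rw [if_neg hg2,
            if_neg (show ¬ (i = a ∧ j = m + v ∧ m + v ≤ c) from fun hh => hg2 hh.2.2),
            hc1 i j hi hj]

def innerFrom (c v a b : Int) (dp : List (List Bool)) : List (List Bool) :=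
  (PySem.List.pyRange b (-1) (-1)).foldl (fun dp s2 => bodyA c v dp a s2) dp

lemma innerFrom_spec (c v a : Int) (f : Int → Int → Bool) (hv : 0 ≤ v) (ha0 : 0 ≤ a) (hac : a ≤ c) :
    ∀ (m : Nat) (dp : List (List Bool)), (m : Int) ≤ c + 1 → Grid c dp →
    (∀ i j, 0 ≤ i → 0 ≤ j → cellA dp i j = innerInv c v a f (m : Int) i j) →
    Grid c (innerFrom c v a ((m : Int) - 1) dp) ∧
    ∀ i j, 0 ≤ i → 0 ≤ j → cellA (innerFrom c v a ((m : Int) - 1) dp) i j = innerInv c v a f 0 i j := by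
  intro m
  induction m with
  | zero =>
    intro dp _ hG hInv
    push_cast
    have h0 : innerFrom c v a (-1) dp = dp := by
      rw [innerFrom, PySem.List.pyRange_neg_one_eq_nil (by omega)]
      rfl
    rw [h0]
    exact ⟨hG, fun i j hi hj => by rw [hInv i j hi hj]; norm_num⟩
  | succ m ih =>
    intro dp hm hG hInv
    have hrange : PySem.List.pyRange (((m : Nat) + 1 : Int) - 1) (-1) (-1)
        = (m : Int) :: PySem.List.pyRange ((m : Int) - 1) (-1) (-1) := by
      have h1 : (((m : Nat) + 1 : Int) - 1) = (m : Int) := by omega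
      rw [h1, PySem.List.pyRange_neg_one_cons (by omega)]
    have hstep := bodyA_step c v a f hv ha0 hac (m : Int) (by omega) (by omega) dp hG
      (fun i j hi hj => by rw [hInv i j hi hj]; norm_num)
    have hfold : innerFrom c v a (((m : Nat) + 1 : Int) - 1) dp
        = innerFrom c v a ((m : Int) - 1) (bodyA c v dp a (m : Int)) := by
      rw [innerFrom, innerFrom]
      push_cast at hrange ⊢
      rw [hrange]
      rfl
    rw [show ((((m : Nat) + 1 : Nat)) : Int) = ((m : Nat) + 1 : Int) by push_cast; ring] at *
    rw [hfold]
    exact ih _ (by omega) hstep.1 hstep.2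

def outerInv (c v : Int) (f : Int → Int → Bool) (m i j : Int) : Bool :=
  f i j || (decide (m ≤ i - v) && w1 c v f i j) || (decide (m ≤ i) && w2 c v f i j)

lemma outer_to_inner (c v : Int) (f : Int → Int → Bool) (hS : Supp c f) (hv : 0 ≤ v) (m : Int) (i j : Int) :
    outerInv c v f (m + 1) i j = innerInv c v m f (c + 1) i j := by
  rw [outerInv, innerInv]
  have h4 : (decide (i - v = m ∧ c + 1 ≤ j) && w1 c v f i j) = false := by
    by_cases hw : f (i - v) j = true
    · have := (hS _ _ hw).2.2.2
      rw [decide_eq_false (by omega : ¬ (i - v = m ∧ c + 1 ≤ j))]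
      rfl
    · rw [w1, Bool.eq_false_iff.mpr hw]
      simp
  have h5 : (decide (i = m ∧ c + 1 ≤ j - v) && w2 c v f i j) = false := by
    by_cases hd : v ≤ j ∧ j ≤ c
    · rw [decide_eq_false (by omega : ¬ (i = m ∧ c + 1 ≤ j - v))]
      rfl
    · rw [w2, decide_eq_false hd]
      simp
  rw [h4, h5, Bool.or_false, Bool.or_false,
      decide_eq_decide.mpr (show (m + 1 ≤ i - v) ↔ (m < i - v) by omega),
      decide_eq_decide.mpr (show (m + 1 ≤ i) ↔ (m < i) by omega)]

lemma inner_to_outer (c v : Int) (f : Int → Int → Bool) (m : Int) (i j : Int)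
    (hj : 0 ≤ j) :
    innerInv c v m f 0 i j = outerInv c v f m i j := by
  rw [innerInv, outerInv, w1, w2, Bool.eq_iff_iff]
  simp only [Bool.or_eq_true, Bool.and_eq_true, decide_eq_true_eq]
  cases hf1 : f i j <;> cases hf2 : f (i - v) j <;> cases hf3 : f i (j - v) <;>
    (try simp) <;> omega

def itemFrom (c v b : Int) (dp : List (List Bool)) : List (List Bool) :=
  (PySem.List.pyRange b (-1) (-1)).foldl (fun dp s1 => innerA c v s1 dp) dp

lemma innerA_spec (c v a : Int) (f : Int → Int → Bool) (hv : 0 ≤ v) (hc : 0 ≤ c)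
    (ha0 : 0 ≤ a) (hac : a ≤ c) (hS : Supp c f) (dp : List (List Bool)) (hG : Grid c dp)
    (hInv : ∀ i j, 0 ≤ i → 0 ≤ j → cellA dp i j = outerInv c v f (a + 1) i j) :
    Grid c (innerA c v a dp) ∧
    ∀ i j, 0 ≤ i → 0 ≤ j → cellA (innerA c v a dp) i j = outerInv c v f a i j := by
  have hinner := innerFrom_spec c v a f hv ha0 hac (c + 1).toNat dp (by omega) hG
    (fun i j hi hj => by
      rw [hInv i j hi hj, outer_to_inner c v f hS hv a i j,
          show (((c + 1).toNat : Nat) : Int) = c + 1 by omega])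
  have heq : innerFrom c v a (((c + 1).toNat : Int) - 1) dp = innerA c v a dp := by
    rw [innerFrom, innerA, show (((c + 1).toNat : Int) - 1) = c by omega]
  rw [heq] at hinner
  exact ⟨hinner.1, fun i j hi hj => by
    rw [hinner.2 i j hi hj, inner_to_outer c v f a i j hj]⟩

lemma itemFrom_spec (c v : Int) (f : Int → Int → Bool) (hv : 0 ≤ v) (hc : 0 ≤ c) (hS : Supp c f) :
    ∀ (m : Nat) (dp : List (List Bool)), (m : Int) ≤ c + 1 → Grid c dp →
    (∀ i j, 0 ≤ i → 0 ≤ j → cellA dp i j = outerInv c v f (m : Int) i j) →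
    Grid c (itemFrom c v ((m : Int) - 1) dp) ∧
    ∀ i j, 0 ≤ i → 0 ≤ j → cellA (itemFrom c v ((m : Int) - 1) dp) i j = outerInv c v f 0 i j := by
  intro m
  induction m with
  | zero =>
    intro dp _ hG hInv
    push_cast
    have h0 : itemFrom c v (-1) dp = dp := by
      rw [itemFrom, PySem.List.pyRange_neg_one_eq_nil (by omega)]
      rfl
    rw [h0]
    refine ⟨hG, fun i j hi hj => ?_⟩
    have := hInv i j hi hj
    push_cast at this
    exact this
  | succ m ih =>
    intro dp hm hG hInv
    have hrange : PySem.List.pyRange (((m : Nat) + 1 : Int) - 1) (-1) (-1)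
        = (m : Int) :: PySem.List.pyRange ((m : Int) - 1) (-1) (-1) := by
      rw [show (((m : Nat) + 1 : Int) - 1) = (m : Int) by omega,
          PySem.List.pyRange_neg_one_cons (by omega)]
    have hstep := innerA_spec c v (m : Int) f hv hc (by omega) (by omega) hS dp hG
      (fun i j hi hj => by rw [hInv i j hi hj]; norm_num)
    have hfold : itemFrom c v (((m : Nat) + 1 : Int) - 1) dp
        = itemFrom c v ((m : Int) - 1) (innerA c v (m : Int) dp) := by
      rw [itemFrom, itemFrom]
      push_cast at hrange ⊢
      rw [hrange]
      rfl
    rw [show ((((m : Nat) + 1 : Nat)) : Int) = ((m : Nat) + 1 : Int) by push_cast; ring] at *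
    rw [hfold]
    exact ih _ (by omega) hstep.1 hstep.2

lemma outerInv_top (c v : Int) (f : Int → Int → Bool) (hv : 0 ≤ v) (hS : Supp c f) (i j : Int) :
    outerInv c v f (c + 1) i j = f i j := by
  rw [outerInv, w1, w2, Bool.eq_iff_iff]
  simp only [Bool.or_eq_true, Bool.and_eq_true, decide_eq_true_eq]
  constructor
  · rintro ((h | ⟨h1, ⟨h2, h3⟩, h4⟩) | ⟨h1, ⟨h2, h3⟩, h4⟩)
    · exact h
    · omega
    · have := (hS _ _ h4).2.1
      omega
  · intro h
    exact Or.inl (Or.inl h)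

lemma outerInv_bot (c v : Int) (f : Int → Int → Bool) (i j : Int) (hi : 0 ≤ i) :
    outerInv c v f 0 i j = stepR c v f i j := by
  rw [outerInv, stepR, w1, w2, Bool.eq_iff_iff]
  simp only [Bool.or_eq_true, Bool.and_eq_true, decide_eq_true_eq]
  constructor
  · rintro ((h | ⟨h1, h2⟩) | ⟨h1, h2⟩)
    · exact Or.inl (Or.inl h)
    · exact Or.inl (Or.inr h2)
    · exact Or.inr h2
  · rintro ((h | ⟨⟨h1, h2⟩, h3⟩) | ⟨⟨h1, h2⟩, h3⟩)
    · exact Or.inl (Or.inl h)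
    · exact Or.inl (Or.inr ⟨by omega, ⟨h1, h2⟩, h3⟩)
    · exact Or.inr ⟨by omega, ⟨h1, h2⟩, h3⟩

lemma itemA_spec (c v : Int) (f : Int → Int → Bool) (hv : 0 ≤ v) (hc : 0 ≤ c) (hS : Supp c f)
    (dp : List (List Bool)) (hG : Grid c dp)
    (hInv : ∀ i j, 0 ≤ i → 0 ≤ j → cellA dp i j = f i j) :
    Grid c (itemA c dp v) ∧
    ∀ i j, 0 ≤ i → 0 ≤ j → cellA (itemA c dp v) i j = stepR c v f i j := by
  have hitem := itemFrom_spec c v f hv hc hS (c + 1).toNat dp (by omega) hG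
    (fun i j hi hj => by
      rw [hInv i j hi hj, ← outerInv_top c v f hv hS i j,
          show (((c + 1).toNat : Nat) : Int) = c + 1 by omega])
  have heq : itemFrom c v (((c + 1).toNat : Int) - 1) dp = itemA c dp v := by
    rw [itemFrom, itemA, show (((c + 1).toNat : Int) - 1) = c by omega]
  rw [heq] at hitem
  exact ⟨hitem.1, fun i j hi hj => by
    rw [hitem.2 i j hi hj, outerInv_bot c v f i j hi]⟩

lemma supp_stepR (c v : Int) (f : Int → Int → Bool) (hv : 0 ≤ v) (hS : Supp c f) :
    Supp c (stepR c v f) := by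
  intro i j h
  rw [stepR, w1, w2] at h
  simp only [Bool.or_eq_true, Bool.and_eq_true, decide_eq_true_eq] at h
  rcases h with (h | ⟨⟨h1, h2⟩, h3⟩) | ⟨⟨h1, h2⟩, h3⟩
  · exact hS _ _ h
  · have := hS _ _ h3
    omega
  · have := hS _ _ h3
    omega

lemma grid_base (c : Int) :
    Grid c ((PySem.List.pyRange 0 (c + 1) 1).map (fun _ => PySem.List.pyRepeat [false] (c + 1))) := by
  constructor
  · rw [List.length_map, PySem.List.length_pyRange_one]
    norm_num
  · intro row hmem
    rcases List.mem_map.mp hmem with ⟨x, _, hx⟩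
    rw [← hx, PySem.List.pyRepeat_singleton, List.length_replicate]

lemma cellA_base (c : Int) (i j : Int) (hi : 0 ≤ i) (hj : 0 ≤ j) :
    cellA ((PySem.List.pyRange 0 (c + 1) 1).map (fun _ => PySem.List.pyRepeat [false] (c + 1))) i j
      = false := by
  rw [cellA_nonneg _ _ _ hi hj]
  set g0 := (PySem.List.pyRange 0 (c + 1) 1).map (fun _ => PySem.List.pyRepeat [false] (c + 1)) with hg
  have hrow : g0.getD i.toNat [] = [] ∨ g0.getD i.toNat [] = List.replicate (c + 1).toNat false := by
    rcases Nat.lt_or_ge i.toNat g0.length with hlt | hge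
    · right
      rw [List.getD_eq_getElem?_getD, List.getElem?_eq_getElem hlt]
      simp only [Option.getD_some, hg, List.getElem_map, PySem.List.pyRepeat_singleton]
    · left
      rw [List.getD_eq_getElem?_getD, List.getElem?_eq_none hge]
      rfl
  rcases hrow with h | h <;> rw [h]
  · rfl
  · rcases Nat.lt_or_ge j.toNat (c + 1).toNat with hlt | hge
    · rw [List.getD_replicate _ hlt]
    · rw [List.getD_eq_getElem?_getD, List.getElem?_eq_none (by rwa [List.length_replicate])]
      rfl

lemma grid_dpInitA (c : Int) (hc : 0 ≤ c) : Grid c (dpInitA c) :=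
  grid_wrA c _ (grid_base c) 0 0 le_rfl hc le_rfl hc

lemma cellA_dpInitA (c : Int) (hc : 0 ≤ c) (i j : Int) (hi : 0 ≤ i) (hj : 0 ≤ j) :
    cellA (dpInitA c) i j = decide (i = 0 ∧ j = 0) := by
  have : dpInitA c = wrA ((PySem.List.pyRange 0 (c + 1) 1).map
      (fun _ => PySem.List.pyRepeat [false] (c + 1))) 0 0 := rfl
  rw [this, cellA_wrA c _ (grid_base c) 0 0 le_rfl hc le_rfl hc i j hi hj]
  by_cases h : i = 0 ∧ j = 0
  · rw [if_pos h, decide_eq_true h]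
  · rw [if_neg h, decide_eq_false h, cellA_base c i j hi hj]

def f0 : Int → Int → Bool := fun i j => decide (i = 0 ∧ j = 0)

lemma supp_f0 (c : Int) (hc : 0 ≤ c) : Supp c f0 := by
  intro i j h
  rw [f0, decide_eq_true_eq] at h
  omega

lemma foldA_spec (c : Int) (hc : 0 ≤ c) :
    ∀ (lst : List Int) (f : Int → Int → Bool) (dp : List (List Bool)),
    (∀ v ∈ lst, 0 ≤ v) → Grid c dp → Supp c f →
    (∀ i j, 0 ≤ i → 0 ≤ j → cellA dp i j = f i j) →
    Supp c (lst.foldl (fun f v => stepR c v f) f) ∧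
    ∀ i j, 0 ≤ i → 0 ≤ j →
      cellA (lst.foldl (itemA c) dp) i j = (lst.foldl (fun f v => stepR c v f) f) i j := by
  intro lst
  induction lst with
  | nil => exact fun f dp _ _ hS hInv => ⟨hS, hInv⟩
  | cons v vs ih =>
    intro f dp hpos hG hS hInv
    have hv : 0 ≤ v := hpos v (List.mem_cons_self ..)
    have hstep := itemA_spec c v f hv hc hS dp hG hInv
    exact ih (stepR c v f) (itemA c dp v) (fun w hw => hpos w (List.mem_cons_of_mem _ hw))
      hstep.1 (supp_stepR c v f hv hS) hstep.2

-- ----- B side: subset-pair semantics -----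
-- Sem lst p: p is the pair of sums of two disjoint subsets of lst (no caps)
def Sem : List Int → Int × Int → Prop
  | [], p => p = (0, 0)
  | v :: t, p => Sem t p ∨ (∃ q : Int × Int, Sem t q ∧ p = (q.1 + v, q.2)) ∨ (∃ q : Int × Int, Sem t q ∧ p = (q.1, q.2 + v))

lemma sem_nil (p : Int × Int) : Sem [] p ↔ p = (0, 0) := Iff.rfl

lemma sem_cons (v : Int) (t : List Int) (p : Int × Int) :
    Sem (v :: t) p ↔ Sem t p ∨ (∃ q : Int × Int, Sem t q ∧ p = (q.1 + v, q.2))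
      ∨ (∃ q : Int × Int, Sem t q ∧ p = (q.1, q.2 + v)) := Iff.rfl

lemma sem_nonneg : ∀ (lst : List Int) (p : Int × Int), (∀ v ∈ lst, 0 ≤ v) → Sem lst p →
    0 ≤ p.1 ∧ 0 ≤ p.2 := by
  intro lst
  induction lst with
  | nil =>
    intro p _ h
    rw [sem_nil] at h
    simp [h]
  | cons v t ih =>
    intro p hpos h
    have hv : 0 ≤ v := hpos v (List.mem_cons_self ..)
    have hpos' : ∀ w ∈ t, 0 ≤ w := fun w hw => hpos w (List.mem_cons_of_mem _ hw)
    rw [sem_cons] at h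
    rcases h with h | ⟨q, hq, rfl⟩ | ⟨q, hq, rfl⟩
    · exact ih p hpos' h
    · have := ih q hpos' hq
      constructor <;> simp <;> omega
    · have := ih q hpos' hq
      constructor <;> simp <;> omega

lemma sem_append : ∀ (xs ys : List Int) (p : Int × Int),
    Sem (xs ++ ys) p ↔ ∃ q r : Int × Int, Sem xs q ∧ Sem ys r ∧ p = (q.1 + r.1, q.2 + r.2) := by
  intro xs
  induction xs with
  | nil =>
    intro ys p
    rw [List.nil_append]
    constructor
    · intro h
      exact ⟨(0, 0), p, rfl, h, by simp⟩
    · rintro ⟨q, r, hq, hr, rfl⟩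
      rw [sem_nil] at hq
      rw [hq]
      simpa using hr
  | cons v t ih =>
    intro ys p
    simp only [List.cons_append, sem_cons]
    constructor
    · rintro (h | ⟨q, hq, rfl⟩ | ⟨q, hq, rfl⟩)
      · rcases (ih ys p).mp h with ⟨q, r, hq, hr, rfl⟩
        exact ⟨q, r, Or.inl hq, hr, rfl⟩
      · rcases (ih ys q).mp hq with ⟨q', r, hq', hr, rfl⟩
        exact ⟨(q'.1 + v, q'.2), r, Or.inr (Or.inl ⟨q', hq', rfl⟩), hr, by simp; try ring⟩
      · rcases (ih ys q).mp hq with ⟨q', r, hq', hr, rfl⟩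
        exact ⟨(q'.1, q'.2 + v), r, Or.inr (Or.inr ⟨q', hq', rfl⟩), hr, by simp; try ring⟩
    · rintro ⟨q, r, hq | ⟨q', hq', rfl⟩ | ⟨q', hq', rfl⟩, hr, rfl⟩
      · exact Or.inl ((ih ys _).mpr ⟨q, r, hq, hr, rfl⟩)
      · refine Or.inr (Or.inl ⟨(q'.1 + r.1, q'.2 + r.2), (ih ys _).mpr ⟨q', r, hq', hr, rfl⟩, ?_⟩)
        simp
        try ring
      · refine Or.inr (Or.inr ⟨(q'.1 + r.1, q'.2 + r.2), (ih ys _).mpr ⟨q', r, hq', hr, rfl⟩, ?_⟩)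
        simp
        try ring

-- the fold of A's per-item relaxation computes exactly the capped subset-pair semantics
lemma foldl_stepR_sem (c : Int) (hc : 0 ≤ c) :
    ∀ (lst : List Int) (f : Int → Int → Bool), (∀ v ∈ lst, 0 ≤ v) → Supp c f →
    ∀ p : Int × Int,
      ((lst.foldl (fun f v => stepR c v f) f) p.1 p.2 = true ↔
        ∃ q r : Int × Int, f q.1 q.2 = true ∧ Sem lst r ∧ p = (q.1 + r.1, q.2 + r.2) ∧ p.1 ≤ c ∧ p.2 ≤ c) := by
  intro lst
  induction lst with
  | nil =>
    intro f _ hS p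
    rw [List.foldl_nil]
    constructor
    · intro h
      have hb := hS _ _ h
      exact ⟨p, (0, 0), h, by rw [sem_nil], by simp, hb.2.1, hb.2.2.2⟩
    · rintro ⟨q, r, hq, hr, rfl, _, _⟩
      rw [sem_nil] at hr
      rw [hr] at *
      simpa using hq
  | cons v t ih =>
    intro f hpos hS p
    have hv : 0 ≤ v := hpos v (List.mem_cons_self ..)
    have hpos' : ∀ w ∈ t, 0 ≤ w := fun w hw => hpos w (List.mem_cons_of_mem _ hw)
    rw [List.foldl_cons, ih (stepR c v f) hpos' (supp_stepR c v f hv hS) p]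
    constructor
    · rintro ⟨q, r, hq, hr, rfl, h1, h2⟩
      rw [stepR, w1, w2] at hq
      simp only [Bool.or_eq_true, Bool.and_eq_true, decide_eq_true_eq] at hq
      rcases hq with (hq | ⟨⟨hb1, hb2⟩, hq⟩) | ⟨⟨hb1, hb2⟩, hq⟩
      · exact ⟨q, r, hq, Or.inl hr, rfl, h1, h2⟩
      · refine ⟨(q.1 - v, q.2), (r.1 + v, r.2), hq,
          Or.inr (Or.inl ⟨r, hr, rfl⟩), by simp; try ring, h1, h2⟩
      · refine ⟨(q.1, q.2 - v), (r.1, r.2 + v), hq,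
          Or.inr (Or.inr ⟨r, hr, rfl⟩), by simp; try ring, h1, h2⟩
    · rintro ⟨q, r, hq, hr, rfl, h1, h2⟩
      rw [sem_cons] at hr
      have hstep_base : stepR c v f q.1 q.2 = true := by
        rw [stepR, hq]
        simp
      rcases hr with hr | ⟨r', hr', rfl⟩ | ⟨r', hr', rfl⟩
      · exact ⟨q, r, hstep_base, hr, rfl, h1, h2⟩
      · have hqb := hS _ _ hq
        have hrb := sem_nonneg t r' hpos' hr'
        refine ⟨(q.1 + v, q.2), r', ?_, hr', by simp; try ring, h1, h2⟩
        rw [stepR, w1]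
        have : (decide (v ≤ q.1 + v ∧ q.1 + v ≤ c) && f (q.1 + v - v) q.2) = true := by
          rw [decide_eq_true (show v ≤ q.1 + v ∧ q.1 + v ≤ c by
            constructor
            · omega
            · simp at h1 ⊢; omega),
            show q.1 + v - v = q.1 by ring]
          simpa using hq
        rw [this]
        simp
      · have hqb := hS _ _ hq
        have hrb := sem_nonneg t r' hpos' hr'
        refine ⟨(q.1, q.2 + v), r', ?_, hr', by simp; try ring, h1, h2⟩
        rw [stepR, w2]
        have : (decide (v ≤ q.2 + v ∧ q.2 + v ≤ c) && f q.1 (q.2 + v - v)) = true := by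
          rw [decide_eq_true (show v ≤ q.2 + v ∧ q.2 + v ≤ c by
            constructor
            · omega
            · simp at h2 ⊢; omega),
            show q.2 + v - v = q.2 by ring]
          simpa using hq
        rw [this]
        simp
    
-- membership and nodup for the nested combine loops
lemma mem_combine_inner (c : Int) (a : Int × Int) :
    ∀ (l : List (Int × Int)) (acc : PySem.Set (Int × Int)) (p : Int × Int),
    (p ∈ l.foldl (fun (acc : PySem.Set (Int × Int)) b =>
        if a.1 + b.1 ≤ c ∧ a.2 + b.2 ≤ c then PySem.Set.add acc (a.1 + b.1, a.2 + b.2) else acc) acc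
      ↔ p ∈ acc ∨ ∃ b ∈ l, a.1 + b.1 ≤ c ∧ a.2 + b.2 ≤ c ∧ p = (a.1 + b.1, a.2 + b.2)) := by
  intro l
  induction l with
  | nil => simp
  | cons b l ih =>
    intro acc p
    rw [List.foldl_cons, ih]
    by_cases hg : a.1 + b.1 ≤ c ∧ a.2 + b.2 ≤ c
    · rw [if_pos hg, PySem.Set.mem_add]
      constructor
      · rintro ((h | rfl) | h)
        · exact Or.inl h
        · exact Or.inr ⟨b, List.mem_cons_self .., hg.1, hg.2, rfl⟩
        · rcases h with ⟨b', hb', h1, h2, rfl⟩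
          exact Or.inr ⟨b', List.mem_cons_of_mem _ hb', h1, h2, rfl⟩
      · rintro (h | ⟨b', hb', h1, h2, rfl⟩)
        · exact Or.inl (Or.inl h)
        · rcases List.mem_cons.mp hb' with rfl | hb''
          · exact Or.inl (Or.inr rfl)
          · exact Or.inr ⟨b', hb'', h1, h2, rfl⟩
    · rw [if_neg hg]
      constructor
      · rintro (h | ⟨b', hb', h1, h2, rfl⟩)
        · exact Or.inl h
        · exact Or.inr ⟨b', List.mem_cons_of_mem _ hb', h1, h2, rfl⟩
      · rintro (h | ⟨b', hb', h1, h2, rfl⟩)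
        · exact Or.inl h
        · rcases List.mem_cons.mp hb' with rfl | hb''
          · exact absurd ⟨h1, h2⟩ hg
          · exact Or.inr ⟨b', hb'', h1, h2, rfl⟩

lemma nodup_combine_inner (c : Int) (a : Int × Int) :
    ∀ (l : List (Int × Int)) (acc : PySem.Set (Int × Int)), acc.Nodup →
    (l.foldl (fun (acc : PySem.Set (Int × Int)) b =>
        if a.1 + b.1 ≤ c ∧ a.2 + b.2 ≤ c then PySem.Set.add acc (a.1 + b.1, a.2 + b.2) else acc)
      acc).Nodup := by
  intro l
  induction l with
  | nil => exact fun acc h => h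
  | cons b l ih =>
    intro acc h
    rw [List.foldl_cons]
    apply ih
    by_cases hg : a.1 + b.1 ≤ c ∧ a.2 + b.2 ≤ c
    · rw [if_pos hg]
      exact PySem.Set.nodup_add _ _ h
    · rwa [if_neg hg]

lemma mem_combineB (c : Int) (L R : PySem.Set (Int × Int)) (p : Int × Int) :
    p ∈ combineB c L R ↔
      ∃ a ∈ L, ∃ b ∈ R, a.1 + b.1 ≤ c ∧ a.2 + b.2 ≤ c ∧ p = (a.1 + b.1, a.2 + b.2) := by
  rw [combineB]
  suffices h : ∀ (l : List (Int × Int)) (acc : PySem.Set (Int × Int)),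
      p ∈ l.foldl (fun acc a =>
        R.foldl (fun (acc : PySem.Set (Int × Int)) b =>
          if a.1 + b.1 ≤ c ∧ a.2 + b.2 ≤ c then PySem.Set.add acc (a.1 + b.1, a.2 + b.2) else acc)
          acc) acc
      ↔ p ∈ acc ∨ ∃ a ∈ l, ∃ b ∈ R, a.1 + b.1 ≤ c ∧ a.2 + b.2 ≤ c ∧ p = (a.1 + b.1, a.2 + b.2) by
    rw [h L PySem.Set.empty]
    simp [PySem.Set.empty]
  intro l
  induction l with
  | nil => simp
  | cons a l ih =>
    intro acc
    rw [List.foldl_cons, ih, mem_combine_inner]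
    constructor
    · rintro ((h | h) | h)
      · exact Or.inl h
      · rcases h with ⟨b, hb, h1, h2, rfl⟩
        exact Or.inr ⟨a, List.mem_cons_self .., b, hb, h1, h2, rfl⟩
      · rcases h with ⟨a', ha', hrest⟩
        exact Or.inr ⟨a', List.mem_cons_of_mem _ ha', hrest⟩
    · rintro (h | ⟨a', ha', hrest⟩)
      · exact Or.inl (Or.inl h)
      · rcases List.mem_cons.mp ha' with rfl | ha''
        · exact Or.inl (Or.inr hrest)
        · exact Or.inr ⟨a', ha'', hrest⟩

lemma nodup_combineB (c : Int) (L R : PySem.Set (Int × Int)) : (combineB c L R).Nodup := by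
  rw [combineB]
  suffices h : ∀ (l : List (Int × Int)) (acc : PySem.Set (Int × Int)), acc.Nodup →
      (l.foldl (fun acc a =>
        R.foldl (fun (acc : PySem.Set (Int × Int)) b =>
          if a.1 + b.1 ≤ c ∧ a.2 + b.2 ≤ c then PySem.Set.add acc (a.1 + b.1, a.2 + b.2) else acc)
          acc) acc).Nodup by
    exact h L PySem.Set.empty (by simp [PySem.Set.empty])
  intro l
  induction l with
  | nil => exact fun acc h => h
  | cons a l ih =>
    intro acc h
    rw [List.foldl_cons]
    exact ih _ (nodup_combine_inner c a R acc h)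

-- the divide-and-conquer reach computes exactly the capped subset-pair semantics
lemma reachBF_spec (c : Int) (hc : 0 ≤ c) :
    ∀ (n : Nat) (items : List Int), items.length ≤ n → (∀ v ∈ items, 0 ≤ v) →
    (reachBF c n items).Nodup ∧
    ∀ p : Int × Int, p ∈ reachBF c n items ↔ Sem items p ∧ p.1 ≤ c ∧ p.2 ≤ c := by
  intro n
  induction n with
  | zero =>
    intro items hlen _
    have h0 : items = [] := List.length_eq_zero_iff.mp (by omega)
    subst h0
    rw [reachBF]
    refine ⟨PySem.Set.nodup_ofList _, fun p => ?_⟩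
    rw [PySem.Set.mem_ofList, List.mem_singleton, sem_nil]
    constructor
    · rintro rfl
      exact ⟨rfl, hc, hc⟩
    · rintro ⟨h, _, _⟩
      exact h
  | succ n ih =>
    intro items hlen hpos
    by_cases h0 : items.length = 0
    · have h0' : items = [] := List.length_eq_zero_iff.mp h0
      subst h0'
      rw [reachBF, if_pos (show ([] : List Int).length = 0 from rfl)]
      refine ⟨PySem.Set.nodup_ofList _, fun p => ?_⟩
      rw [PySem.Set.mem_ofList, List.mem_singleton, sem_nil]
      constructor
      · rintro rfl
        exact ⟨rfl, hc, hc⟩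
      · rintro ⟨h, _, _⟩
        exact h
    · by_cases h1 : items.length = 1
      · rcases List.length_eq_one_iff.mp h1 with ⟨v, rfl⟩
        have hv : 0 ≤ v := hpos v (List.mem_cons_self ..)
        rw [reachBF]
        rw [if_neg (show ¬ ([v] : List Int).length = 0 by simp),
            if_pos (show ([v] : List Int).length = 1 from rfl)]
        have hget : PySem.List.pyGetD [v] (0 : Int) 0 = v := by
          simp [pysem]
        rw [hget]
        have hsem : ∀ p : Int × Int, Sem [v] p ↔ p = (0, 0) ∨ p = (v, 0) ∨ p = (0, v) := by
          intro p
          rw [sem_cons]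
          constructor
          · rintro (h | ⟨q, hq, rfl⟩ | ⟨q, hq, rfl⟩)
            · rw [sem_nil] at h
              exact Or.inl h
            · rw [sem_nil] at hq
              rw [hq]
              simp
            · rw [sem_nil] at hq
              rw [hq]
              simp
          · rintro (rfl | rfl | rfl)
            · exact Or.inl (by rw [sem_nil])
            · exact Or.inr (Or.inl ⟨(0, 0), by rw [sem_nil], by simp⟩)
            · exact Or.inr (Or.inr ⟨(0, 0), by rw [sem_nil], by simp⟩)
        by_cases hvc : v ≤ c
        · rw [if_pos hvc]
          refine ⟨PySem.Set.nodup_add _ _ (PySem.Set.nodup_add _ _ (PySem.Set.nodup_ofList _)), fun p => ?_⟩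
          rw [PySem.Set.mem_add, PySem.Set.mem_add, PySem.Set.mem_ofList, List.mem_singleton,
              hsem p]
          constructor
          · rintro ((rfl | rfl) | rfl)
            · exact ⟨Or.inl rfl, hc, hc⟩
            · exact ⟨Or.inr (Or.inl rfl), hvc, hc⟩
            · exact ⟨Or.inr (Or.inr rfl), hc, hvc⟩
          · rintro ⟨rfl | rfl | rfl, _, _⟩
            · exact Or.inl (Or.inl rfl)
            · exact Or.inl (Or.inr rfl)
            · exact Or.inr rfl
        · rw [if_neg hvc]
          refine ⟨PySem.Set.nodup_ofList _, fun p => ?_⟩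
          rw [PySem.Set.mem_ofList, List.mem_singleton, hsem p]
          constructor
          · rintro rfl
            exact ⟨Or.inl rfl, hc, hc⟩
          · rintro ⟨rfl | rfl | rfl, hp1, hp2⟩
            · rfl
            · exact absurd hp1 hvc
            · exact absurd hp2 hvc
      · -- length ≥ 2: divide and conquer
        rw [reachBF]
        rw [if_neg h0, if_neg h1]
        have hm : PySem.Int.floordiv ((items.length : Int)) 2 = ((items.length / 2 : Nat) : Int) := by
          exact_mod_cast PySem.Int.floordiv_natCast items.length 2
        rw [hm, PySem.List.slice_to_natCast, PySem.List.slice_from_natCast]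
        set mid := items.length / 2 with hmid
        have hmid1 : 1 ≤ mid := by omega
        have hmidlt : mid < items.length := by omega
        have hposT : ∀ v ∈ items.take mid, 0 ≤ v := fun v hv => hpos v (List.mem_of_mem_take hv)
        have hposD : ∀ v ∈ items.drop mid, 0 ≤ v := fun v hv => hpos v (List.mem_of_mem_drop hv)
        have hL := ih (items.take mid) (by rw [List.length_take]; omega) hposT
        have hR := ih (items.drop mid) (by rw [List.length_drop]; omega) hposD
        refine ⟨nodup_combineB _ _ _, fun p => ?_⟩
        rw [mem_combineB]
        have hsplit : items.take mid ++ items.drop mid = items := List.take_append_drop _ _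
        constructor
        · rintro ⟨a, ha, b, hb, h1, h2, rfl⟩
          have hA := (hL.2 a).mp ha
          have hB := (hR.2 b).mp hb
          refine ⟨?_, h1, h2⟩
          rw [← hsplit, sem_append]
          exact ⟨a, b, hA.1, hB.1, rfl⟩
        · rintro ⟨hsem, h1, h2⟩
          rw [← hsplit, sem_append] at hsem
          rcases hsem with ⟨q, r, hq, hr, rfl⟩
          have hqb := sem_nonneg _ q hposT hq
          have hrb := sem_nonneg _ r hposD hr
          simp only at h1 h2
          refine ⟨q, (hL.2 q).mpr ⟨hq, by omega, by omega⟩,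
                  r, (hR.2 r).mpr ⟨hr, by omega, by omega⟩, h1, h2, rfl⟩

-- ----- sorted-scan machinery -----
def LexLT (p q : Int × Int) : Prop := p.1 < q.1 ∨ (p.1 = q.1 ∧ p.2 < q.2)

def b4 : Int × Int → Int × Int → Bool := fun a b =>
  decide (a.1 < b.1) || (!decide (b.1 < a.1) && decide (a.2 < b.2))

lemma b4_iff (a b : Int × Int) : b4 a b = true ↔ LexLT a b := by
  rw [b4, LexLT]
  simp only [Bool.or_eq_true, Bool.and_eq_true, Bool.not_eq_eq_eq_not, Bool.not_true,
    decide_eq_true_eq, decide_eq_false_iff_not]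
  omega

lemma sorted2_eq_foldl (xs : List (Int × Int)) :
    PySem.List.sorted2 xs (fun p => p.1) (fun p => p.2)
      = xs.foldl (fun acc x => PySem.List.insertBy b4 x acc) [] := rfl

lemma pairwise_insertBy_lex (x : Int × Int) (ys : List (Int × Int))
    (h : ys.Pairwise (fun a b => ¬ LexLT b a)) :
    (PySem.List.insertBy b4 x ys).Pairwise (fun a b => ¬ LexLT b a) := by
  induction ys with
  | nil => simp [PySem.List.insertBy]
  | cons y ys ih =>
    rw [PySem.List.insertBy]
    rcases h with _ | ⟨hy, hys⟩
    by_cases hb : b4 x y = true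
    · rw [if_pos hb]
      have hxy : LexLT x y := (b4_iff x y).mp hb
      refine List.Pairwise.cons ?_ (List.Pairwise.cons hy hys)
      intro z hz
      rcases List.mem_cons.mp hz with rfl | hz'
      · rw [LexLT] at *
        omega
      · have := hy z hz'
        rw [LexLT] at *
        omega
    · rw [if_neg (by simpa using hb)]
      refine List.Pairwise.cons ?_ (ih hys)
      intro z hz
      have hz2 := hz
      rw [PySem.List.mem_insertBy] at hz2
      rcases hz2 with heq | hz'
      · exact heq ▸ (fun hh => hb ((b4_iff x y).mpr hh))
      · exact hy z hz'

lemma pairwise_sorted2 (xs : List (Int × Int)) :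
    (PySem.List.sorted2 xs (fun p => p.1) (fun p => p.2)).Pairwise (fun a b => ¬ LexLT b a) := by
  rw [sorted2_eq_foldl]
  suffices h : ∀ (l : List (Int × Int)) (acc : List (Int × Int)),
      acc.Pairwise (fun a b => ¬ LexLT b a) →
      (l.foldl (fun acc x => PySem.List.insertBy b4 x acc) acc).Pairwise (fun a b => ¬ LexLT b a) by
    exact h xs [] (by simp)
  intro l
  induction l with
  | nil => exact fun acc h => h
  | cons x l ih => exact fun acc h => ih _ (pairwise_insertBy_lex x acc h)

lemma pairwise_lexlt_sorted2 (xs : List (Int × Int)) (hN : xs.Nodup) :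
    (PySem.List.sorted2 xs (fun p => p.1) (fun p => p.2)).Pairwise LexLT := by
  have h1 := pairwise_sorted2 xs
  have h2 : (PySem.List.sorted2 xs (fun p => p.1) (fun p => p.2)).Nodup :=
    ((PySem.List.sorted2_perm xs _ _ false).nodup_iff).mpr hN
  refine (h1.and h2).imp ?_
  rintro ⟨a1, a2⟩ ⟨b1, b2⟩ ⟨hnl, hne⟩
  rw [LexLT] at *
  have : ¬ (a1 = b1 ∧ a2 = b2) := fun hh => hne (by simp [hh.1, hh.2])
  omega

def gp (c : Int) : List (Int × Int) :=
  (PySem.List.pyRange 0 (c + 1) 1).flatMap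
    (fun s1 => (PySem.List.pyRange 0 (c + 1) 1).map (fun s2 => (s1, s2)))

lemma pairwise_gp (c : Int) : (gp c).Pairwise LexLT := by
  rw [gp, List.pairwise_flatMap]
  constructor
  · intro a _
    refine List.Pairwise.map _ ?_ (PySem.List.pairwise_lt_pyRange_one 0 (c + 1))
    intro x y hxy
    exact Or.inr ⟨rfl, hxy⟩
  · refine (PySem.List.pairwise_lt_pyRange_one 0 (c + 1)).imp ?_
    intro a b hab x hx y hy
    rcases List.mem_map.mp hx with ⟨u, _, rfl⟩
    rcases List.mem_map.mp hy with ⟨w, _, rfl⟩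
    exact Or.inl hab

lemma mem_gp (c : Int) (p : Int × Int) :
    p ∈ gp c ↔ 0 ≤ p.1 ∧ p.1 ≤ c ∧ 0 ≤ p.2 ∧ p.2 ≤ c := by
  rw [gp, List.mem_flatMap]
  constructor
  · rintro ⟨s1, hs1, hp⟩
    rcases List.mem_map.mp hp with ⟨s2, hs2, rfl⟩
    rw [PySem.List.mem_pyRange_one] at hs1 hs2
    simp
    omega
  · rintro ⟨h1, h2, h3, h4⟩
    refine ⟨p.1, ?_, ?_⟩
    · rw [PySem.List.mem_pyRange_one]
      omega
    · refine List.mem_map.mpr ⟨p.2, ?_, rfl⟩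
      rw [PySem.List.mem_pyRange_one]
      omega

lemma nodup_gp (c : Int) : (gp c).Nodup :=
  (pairwise_gp c).imp (fun hab hh => by rw [LexLT] at hab; cases hh; omega)

lemma sorted2_eq_filter_gp (c : Int) (S : List (Int × Int)) (hN : S.Nodup)
    (q : Int × Int → Bool)
    (hmem : ∀ p : Int × Int, p ∈ S ↔ p ∈ gp c ∧ q p = true) :
    PySem.List.sorted2 S (fun p => p.1) (fun p => p.2) = (gp c).filter q := by
  have hfil : ∀ p : Int × Int, p ∈ (gp c).filter q ↔ p ∈ S := by
    intro p
    rw [List.mem_filter, hmem]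
  have hperm2 : S.Perm ((gp c).filter q) := by
    refine List.perm_of_nodup_nodup_toFinset_eq hN ((nodup_gp c).filter q) ?_
    ext p
    rw [List.mem_toFinset, List.mem_toFinset, hfil]
  have hperm : (PySem.List.sorted2 S (fun p => p.1) (fun p => p.2)).Perm ((gp c).filter q) :=
    (PySem.List.sorted2_perm S _ _ false).trans hperm2
  exact List.eq_of_perm_of_sorted
    (fun a b _ _ h1 h2 => by rw [LexLT] at h1 h2; rcases a with ⟨a1,a2⟩; rcases b with ⟨b1,b2⟩; simp; omega)
    (pairwise_lexlt_sorted2 S hN) ((pairwise_gp c).filter q) hperm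

def scanStep : Int × (Int × Int) → Int × Int → Int × (Int × Int) := fun acc p =>
  if p.1 + p.2 > acc.1 ∨ (p.1 + p.2 = acc.1 ∧ |p.1 - p.2| < |acc.2.1 - acc.2.2|) then
    (p.1 + p.2, p)
  else acc

lemma scanB_eq (states : PySem.Set (Int × Int)) :
    scanB states = (PySem.List.sorted2 states (fun p => p.1) (fun p => p.2)).foldl scanStep
      ((0 : Int), ((0 : Int), (0 : Int))) := rfl

lemma scanA_eq (c : Int) (dp : List (List Bool)) :
    scanA c dp = ((gp c).filter (fun p => cellA dp p.1 p.2)).foldl scanStep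
      ((0 : Int), ((0 : Int), (0 : Int))) := by
  rw [scanA, gp, List.foldl_filter, List.foldl_flatMap]
  congr 1
  funext acc s1
  rw [List.foldl_map]
  congr 1
  funext acc' s2
  cases hcell : cellA dp s1 s2 <;> simp [scanStep]

theorem optim_eq_alt (lst : List Int) (c : Int) (hc : 0 ≤ c) (hpos : ∀ v ∈ lst, 0 ≤ v) :
    optim lst c = optim_alt lst c := by
  have hA := foldA_spec c hc lst f0 (dpInitA c) hpos (grid_dpInitA c hc) (supp_f0 c hc)
    (fun i j hi hj => by rw [cellA_dpInitA c hc i j hi hj, f0])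
  have hF := foldl_stepR_sem c hc lst f0 hpos (supp_f0 c hc)
  have hB := reachBF_spec c hc lst.length lst le_rfl hpos
  set F := lst.foldl (fun f v => stepR c v f) f0 with hFdef
  set dpF := lst.foldl (itemA c) (dpInitA c) with hdpF
  set statesF := reachBF c lst.length lst with hstatesF
  -- F p ↔ capped subset-pair semantics
  have hFsem : ∀ p : Int × Int, F p.1 p.2 = true ↔ Sem lst p ∧ p.1 ≤ c ∧ p.2 ≤ c := by
    intro p
    rw [hF p]
    constructor
    · rintro ⟨q, r, hq, hr, rfl, h1, h2⟩
      rw [f0, decide_eq_true_eq] at hq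
      rw [hq.1, hq.2] at *
      simp only [zero_add] at *
      exact ⟨(by rcases r with ⟨r1, r2⟩; exact hr), h1, h2⟩
    · rintro ⟨hsem, h1, h2⟩
      exact ⟨(0, 0), p, by rw [f0]; simp, hsem, by simp, h1, h2⟩
  have hmem : ∀ p : Int × Int, p ∈ statesF ↔ p ∈ gp c ∧ cellA dpF p.1 p.2 = true := by
    intro p
    rw [hB.2 p, ← hFsem p, mem_gp]
    constructor
    · intro h
      have hb := hA.1 _ _ h
      exact ⟨⟨hb.1, hb.2.1, hb.2.2.1, hb.2.2.2⟩, by rw [hA.2 p.1 p.2 hb.1 hb.2.2.1]; exact h⟩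
    · rintro ⟨⟨h1, h2, h3, h4⟩, h⟩
      rw [hA.2 p.1 p.2 h1 h3] at h
      exact h
  have hsorted := sorted2_eq_filter_gp c statesF hB.1 (fun p => cellA dpF p.1 p.2) hmem
  rw [optim, optim_alt, reachB, ← hdpF, ← hstatesF, scanA_eq, scanB_eq, hsorted]

-- ===== VERDICT (by name: the statement is the Claim_ definition above) =====
theorem optim_spec : Claim_equal_optim := by
  intro lst c _ hpre
  exact optim_eq_alt lst c hpre.1 hpre.2
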